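-- pv_equiv track=rewrite | github.com/blebon/directChillFoam | tutorials/heatTransfer/directChillFoam/Subroto2021/system/cylinder.py | write_boundary
-- ===== SOURCE A (Python) =====
-- def write_boundary(z_points=(-331.0, -71.0, -57.0, -40.0, 0.0, 50.0)):
--     """
--     Boundary
--     """
--     block = "boundary\n"
--     block += "(\n"
--     faces = ["water-film", "air-gap", "mould", "graphite", "hot-top"]
--     N = 3
--     for i in range(len(z_points) - 1):
--         block += f"    {faces[i]:s}\n"
--         block += "    {\n"
--         block += "        type wall;\n"
--         block += "        faces\n"
--         block += "        (\n"
--         block += f"            ({1+N*i:2d} {2+N*i:2d} {5+N*i:2d} {4+N*i:2d})\n"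
--         block += "        );\n"
--         block += "    }\n"
--         block += "\n"
--
--     i = 0
--     block += "    ram\n"
--     block += "    {\n"
--     block += "        type patch;\n"
--     block += "        faces\n"
--     block += "        (\n"
--     block += f"            ({0+N*i:2d} {2+N*i:2d} {1+N*i:2d} {0+N*i:2d})\n"
--     block += "        );\n"
--     block += "    }\n"
--     block += "\n"
--
--     i = len(z_points) - 1
--     block += "    free-surface\n"
--     block += "    {\n"
--     block += "        type patch;\n"
--     block += "        faces\n"
--     block += "        (\n"
--     block += f"            ({0+N*i:2d} {2+N*i:2d} {1+N*i:2d} {0+N*i:2d})\n"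
--     block += "        );\n"
--     block += "    }\n"
--     block += "\n"
--
--     block += "    axis\n"
--     block += "    {\n"
--     block += "        type empty;\n"
--     block += "        faces\n"
--     block += "        (\n"
--     for i in range(len(z_points) - 1):
--         block += f"            ({3+N*i:2d} {0+N*i:2d} {0+N*i:2d} {3+N*i:2d})\n"
--     block += "        );\n"
--     block += "    }\n"
--     block += "\n"
--
--     block += "    symmetry_planes\n"
--     block += "    {\n"
--     block += "        type symmetry;\n"
--     block += "        faces\n"
--     block += "        (\n"
--     for i in range(len(z_points) - 1):
--         block += f"            ({0+N*i:2d} {1+N*i:2d} {4+N*i:2d} {3+N*i:2d})\n"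
--         block += f"            ({5+N*i:2d} {2+N*i:2d} {0+N*i:2d} {3+N*i:2d})\n"
--     block += "        );\n"
--     block += "    }\n"
--
--     block += ");"
--
--     return block
-- ===== SOURCE B (Python) =====
-- def write_boundary(z_points=(-331.0, -71.0, -57.0, -40.0, 0.0, 50.0)):
--     """
--     Boundary
--     """
--     n = len(z_points) - 1
--     N = 3
--     names = ["water-film", "air-gap", "mould", "graphite", "hot-top"]
--     sections = [(names[i], "wall", [(1 + N * i, 2 + N * i, 5 + N * i, 4 + N * i)])
--                 for i in range(n)]
--     sections.append(("ram", "patch", [(0, 2, 1, 0)]))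
--     sections.append(("free-surface", "patch", [(N * n, 2 + N * n, 1 + N * n, N * n)]))
--     sections.append(("axis", "empty",
--                      [(3 + N * i, N * i, N * i, 3 + N * i) for i in range(n)]))
--     sections.append(("symmetry_planes", "symmetry",
--                      [q for i in range(n)
--                         for q in ((N * i, 1 + N * i, 4 + N * i, 3 + N * i),
--                                   (5 + N * i, 2 + N * i, N * i, 3 + N * i))]))
--     return "boundary\n(\n" + "\n".join(_section(*s) for s in sections) + ");"
--
--
-- def _section(name, kind, quads):
--     lines = "".join("            (%2d %2d %2d %2d)\n" % q for q in quads)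
--     return ("    %s\n    {\n        type %s;\n        faces\n        (\n"
--             % (name, kind)) + lines + "        );\n    }\n"
-- ===== Notes on version B (the rewrite author's own statement) =====
-- stated objective: simpler
-- what changed: Replaces the hand-written sequence of five per-section emission blocks by a data-driven pass: a list of (name, type, face-quads) patch descriptors built first, then rendered by one shared section formatter and joined.
-- outside the precondition, e.g. on write_boundary((0, 1, 2, 3, 4, 5, 6)): A raises IndexError, B raises IndexError
import Mathlib
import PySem

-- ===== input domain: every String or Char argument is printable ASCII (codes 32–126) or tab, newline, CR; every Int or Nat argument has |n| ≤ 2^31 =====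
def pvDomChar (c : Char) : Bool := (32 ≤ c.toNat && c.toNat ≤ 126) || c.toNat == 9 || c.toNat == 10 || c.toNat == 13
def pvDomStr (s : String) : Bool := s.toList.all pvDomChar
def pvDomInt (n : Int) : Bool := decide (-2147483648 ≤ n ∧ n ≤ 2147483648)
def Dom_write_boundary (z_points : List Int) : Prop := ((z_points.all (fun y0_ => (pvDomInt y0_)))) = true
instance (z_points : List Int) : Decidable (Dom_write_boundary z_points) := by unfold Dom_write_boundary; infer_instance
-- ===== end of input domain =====

-- B replaces A's hand-written sequence of section blocks by a data-driven list of
-- (name, type, face-quads) descriptors rendered by one formatting helper (objective: simpler).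

-- ===== PORT A =====
-- f"{x:2d}": str(x) left-padded with spaces to width 2
def pvPad2A (x : Int) : String :=
  let s := PySem.Int.toStr x
  if s.toList.length < 2 then " " ++ s else s

-- f"            ({a:2d} {b:2d} {c:2d} {d:2d})\n"
def pvQuadA (a b c d : Int) : String :=
  "            (" ++ pvPad2A a ++ " " ++ pvPad2A b ++ " " ++ pvPad2A c ++ " " ++ pvPad2A d ++ ")\n"

def write_boundary (z_points : List Int) : String :=
  let block := "boundary\n(\n"
  let faces : List String := ["water-film", "air-gap", "mould", "graphite", "hot-top"]
  let N : Int := 3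
  let block := (PySem.List.pyRange 0 ((z_points.length : Int) - 1) 1).foldl (fun block i =>
    block ++ "    " ++ ((PySem.List.pyGet? faces i).getD "") ++ "\n"
      ++ "    {\n" ++ "        type wall;\n" ++ "        faces\n" ++ "        (\n"
      ++ pvQuadA (1 + N * i) (2 + N * i) (5 + N * i) (4 + N * i)
      ++ "        );\n" ++ "    }\n" ++ "\n") block
  let i : Int := 0
  let block := block ++ "    ram\n" ++ "    {\n" ++ "        type patch;\n"
      ++ "        faces\n" ++ "        (\n"
      ++ pvQuadA (0 + N * i) (2 + N * i) (1 + N * i) (0 + N * i)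
      ++ "        );\n" ++ "    }\n" ++ "\n"
  let i : Int := (z_points.length : Int) - 1
  let block := block ++ "    free-surface\n" ++ "    {\n" ++ "        type patch;\n"
      ++ "        faces\n" ++ "        (\n"
      ++ pvQuadA (0 + N * i) (2 + N * i) (1 + N * i) (0 + N * i)
      ++ "        );\n" ++ "    }\n" ++ "\n"
  let block := block ++ "    axis\n" ++ "    {\n" ++ "        type empty;\n"
      ++ "        faces\n" ++ "        (\n"
  let block := (PySem.List.pyRange 0 ((z_points.length : Int) - 1) 1).foldl (fun block i =>
    block ++ pvQuadA (3 + N * i) (0 + N * i) (0 + N * i) (3 + N * i)) block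
  let block := block ++ "        );\n" ++ "    }\n" ++ "\n"
  let block := block ++ "    symmetry_planes\n" ++ "    {\n" ++ "        type symmetry;\n"
      ++ "        faces\n" ++ "        (\n"
  let block := (PySem.List.pyRange 0 ((z_points.length : Int) - 1) 1).foldl (fun block i =>
    block ++ pvQuadA (0 + N * i) (1 + N * i) (4 + N * i) (3 + N * i)
          ++ pvQuadA (5 + N * i) (2 + N * i) (0 + N * i) (3 + N * i)) block
  let block := block ++ "        );\n" ++ "    }\n"
  block ++ ");"

-- ===== PORT B =====
-- "            (%2d %2d %2d %2d)\n" % q  (reuses the width-2 formatter pvPad2A, the same "%2d")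
def pvQuadB (q : Int × Int × Int × Int) : String :=
  "            (" ++ pvPad2A q.1 ++ " " ++ pvPad2A q.2.1 ++ " " ++ pvPad2A q.2.2.1
    ++ " " ++ pvPad2A q.2.2.2 ++ ")\n"

def pvSectionB (s : String × String × List (Int × Int × Int × Int)) : String :=
  "    " ++ s.1 ++ "\n    {\n        type " ++ s.2.1 ++ ";\n        faces\n        (\n"
    ++ String.join (s.2.2.map pvQuadB) ++ "        );\n    }\n"

def write_boundary_alt (z_points : List Int) : String :=
  let n : Int := (z_points.length : Int) - 1
  let N : Int := 3
  let names : List String := ["water-film", "air-gap", "mould", "graphite", "hot-top"]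
  let sections : List (String × String × List (Int × Int × Int × Int)) :=
    (PySem.List.pyRange 0 n 1).map (fun i =>
      ((PySem.List.pyGet? names i).getD "", "wall",
        [(1 + N * i, 2 + N * i, 5 + N * i, 4 + N * i)]))
    ++ [("ram", "patch", [((0 : Int), (2 : Int), (1 : Int), (0 : Int))])]
    ++ [("free-surface", "patch", [(N * n, 2 + N * n, 1 + N * n, N * n)])]
    ++ [("axis", "empty",
          (PySem.List.pyRange 0 n 1).map (fun i => (3 + N * i, N * i, N * i, 3 + N * i)))]
    ++ [("symmetry_planes", "symmetry",
          (PySem.List.pyRange 0 n 1).flatMap (fun i =>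
            [(N * i, 1 + N * i, 4 + N * i, 3 + N * i),
             (5 + N * i, 2 + N * i, N * i, 3 + N * i)]))]
  "boundary\n(\n" ++ PySem.Str.join "\n" (sections.map pvSectionB) ++ ");"

-- ===== PRECONDITION & SPEC =====
-- Pre_ excludes lists of length ≥ 7: there A raises IndexError (faces has only 5 names).
def Pre_write_boundary (z_points : List Int) : Prop := z_points.length ≤ 6
instance (z_points : List Int) : Decidable (Pre_write_boundary z_points) := by
  unfold Pre_write_boundary; infer_instance
def pvWitness_write_boundary : List Int := [-331, -71, -57, -40, 0, 50]

def Spec_write_boundary (z_points : List Int) (out : String) : Prop := out = write_boundary_alt z_points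
instance (z_points : List Int) (out : String) : Decidable (Spec_write_boundary z_points out) := by unfold Spec_write_boundary; infer_instance

-- ===== CLAIM (what is proved, stated in full; the proofs are below) =====
def Claim_equal_write_boundary : Prop := ∀ (z_points : List Int), Dom_write_boundary z_points → Pre_write_boundary z_points → Spec_write_boundary z_points (write_boundary z_points)

-- ===== LEMMAS AND PROOFS =====
-- concatenation helper used only by the proofs
def pvCat : List String → String
  | [] => ""
  | s :: l => s ++ pvCat l

theorem pvCat_append (l₁ l₂ : List String) : pvCat (l₁ ++ l₂) = pvCat l₁ ++ pvCat l₂ := by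
  induction l₁ with
  | nil => simp [pvCat]
  | cons a l ih => simp [pvCat, ih, String.append_assoc]

theorem foldl_append_acc (l : List String) : ∀ acc : String, l.foldl (· ++ ·) acc = acc ++ pvCat l := by
  induction l with
  | nil => intro acc; simp [pvCat]
  | cons a l ih => intro acc; simp [pvCat, List.foldl_cons, ih, String.append_assoc]

theorem strJoin_eq (l : List String) : String.join l = pvCat l := by
  show l.foldl (· ++ ·) "" = pvCat l
  rw [foldl_append_acc, String.empty_append]

theorem pyjoin_singleton (x : String) : PySem.Str.join "\n" [x] = x :=
  String.toList_inj.mp (by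
    simp only [PySem.Str.toList_join, List.map_cons, List.map_nil, PySem.Chars.join_singleton])

theorem pyjoin_cons_cons (a b : String) (l : List String) :
    PySem.Str.join "\n" (a :: b :: l) = a ++ "\n" ++ PySem.Str.join "\n" (b :: l) :=
  String.toList_inj.mp (by
    simp only [PySem.Str.toList_join, List.map_cons, PySem.Chars.join_cons_cons,
      String.toList_append])

theorem pyjoin_snoc (l : List String) (x : String) :
    PySem.Str.join "\n" (l ++ [x]) = pvCat (l.map (· ++ "\n")) ++ x := by
  induction l with
  | nil => simp [pvCat, pyjoin_singleton]
  | cons a l ih =>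
    cases l with
    | nil => simp [pvCat, pyjoin_cons_cons, pyjoin_singleton, String.append_assoc]
    | cons b t =>
      rw [List.cons_append, List.cons_append, pyjoin_cons_cons, ← List.cons_append, ih]
      simp [pvCat, String.append_assoc]

theorem wallsA_fold (r : List Int) : ∀ acc : String,
    r.foldl (fun block i =>
      block ++ "    " ++ ((PySem.List.pyGet? ["water-film", "air-gap", "mould", "graphite", "hot-top"] i).getD "") ++ "\n"
        ++ "    {\n" ++ "        type wall;\n" ++ "        faces\n" ++ "        (\n"
        ++ pvQuadA (1 + 3 * i) (2 + 3 * i) (5 + 3 * i) (4 + 3 * i)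
        ++ "        );\n" ++ "    }\n" ++ "\n") acc
    = acc ++ pvCat (r.map (fun i =>
        pvSectionB ((PySem.List.pyGet? ["water-film", "air-gap", "mould", "graphite", "hot-top"] i).getD "", "wall",
          [(1 + 3 * i, 2 + 3 * i, 5 + 3 * i, 4 + 3 * i)]) ++ "\n")) := by
  induction r with
  | nil => intro acc; simp [pvCat]
  | cons i r ih =>
    intro acc
    rw [List.foldl_cons, ih, List.map_cons]
    apply String.toList_inj.mp
    simp only [pvCat, pvSectionB, pvQuadA, pvQuadB, strJoin_eq, List.map_cons, List.map_nil,
      String.toList_append, List.append_assoc]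
    rfl

theorem axisA_fold (r : List Int) : ∀ acc : String,
    r.foldl (fun block i => block ++ pvQuadA (3 + 3 * i) (3 * i) (3 * i) (3 + 3 * i)) acc
    = acc ++ pvCat ((r.map (fun i => ((3 + 3 * i, 3 * i, 3 * i, 3 + 3 * i) : Int × Int × Int × Int))).map pvQuadB) := by
  induction r with
  | nil => intro acc; simp [pvCat]
  | cons i r ih =>
    intro acc
    rw [List.foldl_cons, ih, List.map_cons, List.map_cons]
    apply String.toList_inj.mp
    simp only [pvCat, pvQuadA, pvQuadB,
      List.map_map,
      String.toList_append, List.append_assoc]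

theorem symA_fold (r : List Int) : ∀ acc : String,
    r.foldl (fun block i =>
      block ++ pvQuadA (3 * i) (1 + 3 * i) (4 + 3 * i) (3 + 3 * i)
            ++ pvQuadA (5 + 3 * i) (2 + 3 * i) (3 * i) (3 + 3 * i)) acc
    = acc ++ pvCat ((r.flatMap (fun i =>
        [((3 * i, 1 + 3 * i, 4 + 3 * i, 3 + 3 * i) : Int × Int × Int × Int),
         (5 + 3 * i, 2 + 3 * i, 3 * i, 3 + 3 * i)])).map pvQuadB) := by
  induction r with
  | nil => intro acc; simp [pvCat]
  | cons i r ih =>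
    intro acc
    rw [List.foldl_cons, ih, List.flatMap_cons]
    apply String.toList_inj.mp
    simp only [pvCat, pvQuadA, pvQuadB, List.map_cons,
      List.cons_append, List.nil_append,
      String.toList_append, List.append_assoc]

-- ===== VERDICT (by name: the statement is the Claim_ definition above) =====
theorem write_boundary_spec : Claim_equal_write_boundary := by
  intro z _ _
  show write_boundary z = write_boundary_alt z
  simp only [write_boundary, write_boundary_alt, zero_add]
  generalize (PySem.List.pyRange 0 ((z.length : Int) - 1) 1) = r
  rw [wallsA_fold, axisA_fold, symA_fold]
  simp only [List.map_append, List.map_cons, List.map_nil, List.map_map]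
  rw [pyjoin_snoc]
  apply String.toList_inj.mp
  simp only [pvCat_append, pvCat, pvSectionB, pvQuadA, pvQuadB, strJoin_eq, List.map_cons, List.map_nil,
      List.map_append, List.map_map, List.cons_append, List.nil_append,
      String.toList_append, List.append_assoc]
  simp [Function.comp_def, pvSectionB, pvQuadB, strJoin_eq, pvCat, List.cons_append]
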